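-- pv_equiv track=rewrite | github.com/KiritoCurry/15688LOLOL | Champion_combination.py | top_three
-- ===== SOURCE A (Python) =====
-- def top_three(l, teammates):
--     m = {}
--     for a in l:
--         if a in m:
--             m[a].append(l.index(a))
--         else:
--             m[a] = [l.index(a)]
--     l = sorted(l, reverse=True)
--     index = l[0:3]
--     res = []
--     for i in [m[i] for i in index]:
--         for j in i:
--             res.append(teammates[j])
--
--     return res
-- ===== SOURCE B (Python) =====
-- def _insert_desc(top, a):
--     for k in range(len(top)):
--         if top[k] < a:
--             return top[:k] + [a] + top[k:]
--     return top + [a]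
--
--
-- def _first_and_count(l, v):
--     first = -1
--     cnt = 0
--     for i, x in enumerate(l):
--         if x == v:
--             if cnt == 0:
--                 first = i
--             cnt += 1
--     return first, cnt
--
--
-- def top_three(l, teammates):
--     top = []
--     for a in l:
--         if len(top) < 3 or a > top[-1]:
--             top = _insert_desc(top, a)
--             if len(top) > 3:
--                 top.pop()
--     res = []
--     for v in top:
--         first, cnt = _first_and_count(l, v)
--         res.extend([teammates[first]] * cnt)
--     return res
-- ===== Notes on version B (the rewrite author's own statement) =====
-- stated objective: faster
-- what changed: A sorts the whole list and builds a dict of l.index lists (rescanning l per element); B never sorts and never builds a dict: one bounded-buffer pass keeps the three largest values in descending order, then for each of them a single scan finds the first index and the count and emits teammates[first] repeated count times.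
import Mathlib
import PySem

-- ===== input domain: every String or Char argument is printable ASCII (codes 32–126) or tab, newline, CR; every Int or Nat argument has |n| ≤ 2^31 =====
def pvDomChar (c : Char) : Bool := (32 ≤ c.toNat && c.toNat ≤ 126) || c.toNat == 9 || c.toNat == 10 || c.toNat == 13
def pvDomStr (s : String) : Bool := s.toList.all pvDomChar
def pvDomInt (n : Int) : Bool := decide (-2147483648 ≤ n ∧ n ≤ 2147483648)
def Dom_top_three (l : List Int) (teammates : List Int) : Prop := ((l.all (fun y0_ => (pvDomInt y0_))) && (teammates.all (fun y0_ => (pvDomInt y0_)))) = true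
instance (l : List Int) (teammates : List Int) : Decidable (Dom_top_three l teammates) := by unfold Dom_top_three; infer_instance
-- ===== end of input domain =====

-- B drops A's full sort and dict-of-index-lists: a bounded top-3 buffer kept in one pass,
-- then a per-value scan for first index and count; objective: faster.

-- ===== PORT A =====
-- loop body of A: m[a].append(l.index(a)) / m[a] = [l.index(a)]  (l.index returns the FIRST
-- index; the .getD 0 never fires since a ∈ l)
def aStep (l : List Int) (m : PySem.Dict Int (List Int)) (a : Int) : PySem.Dict Int (List Int) :=
  if m.contains a then
    m.insert a (m.getD a [] ++ [((PySem.List.index? l a).getD 0 : Int)])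
  else
    m.insert a [((PySem.List.index? l a).getD 0 : Int)]

-- literal port of A; teammates[j] is pyGetD (j ≥ 0 always); an out-of-range j (Python
-- IndexError) is excluded by Pre_top_three.
def top_three (l : List Int) (teammates : List Int) : List Int :=
  let m := l.foldl (aStep l) PySem.Dict.empty
  let l2 := PySem.List.sorted l (fun x => x) true
  let index := PySem.List.slice l2 (some 0) (some 3)
  (index.map (fun i => m.getD i [])).foldl
    (fun res i => i.foldl (fun res j => res ++ [PySem.List.pyGetD teammates j 0]) res) []

-- ===== PORT B =====
-- helper _insert_desc of Source B: insert a before the first element strictly smaller than it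
def insDesc : List Int → Int → List Int
  | [], a => [a]
  | x :: xs, a => if x < a then a :: x :: xs else x :: insDesc xs a

-- loop body of Source B: if len(top) < 3 or a > top[-1]: top = _insert_desc(top, a); pop if > 3
def topStep (top : List Int) (a : Int) : List Int :=
  if top.length < 3 ∨ PySem.List.pyGetD top (-1) 0 < a then
    let t := insDesc top a
    if t.length > 3 then t.dropLast else t
  else top

-- helper _first_and_count of Source B: one scan recording the first index (sentinel -1) and count
def firstCount (l : List Int) (v : Int) : Int × Int :=
  (PySem.List.enumerate l 0).foldl
    (fun st p => if p.2 = v then ((if st.2 = 0 then p.1 else st.1), st.2 + 1) else st)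
    (-1, 0)

-- literal port of Source B: bounded top-3 pass, then per-value scan and extend
def top_three_alt (l : List Int) (teammates : List Int) : List Int :=
  let top := l.foldl topStep []
  top.foldl
    (fun res v =>
      let fc := firstCount l v
      res ++ List.replicate fc.2.toNat (PySem.List.pyGetD teammates fc.1 0)) []

-- ===== PRECONDITION & SPEC =====
-- A (and B alike) raise IndexError exactly when the first occurrence of one of the three
-- largest values of l lies at an index ≥ len(teammates); Pre_ excludes precisely those inputs.
def Pre_top_three (l : List Int) (teammates : List Int) : Prop :=
  ∀ v ∈ (PySem.List.sorted l (fun x => x) true).take 3,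
    (PySem.List.index? l v).getD 0 < teammates.length
instance (l : List Int) (teammates : List Int) : Decidable (Pre_top_three l teammates) := by
  unfold Pre_top_three; infer_instance

def pvWitness_top_three : List Int × List Int := ([3, 1, 2, 1], [10, 20, 30, 40])

def Spec_top_three (l : List Int) (teammates : List Int) (out : List Int) : Prop := out = top_three_alt l teammates
instance (l : List Int) (teammates : List Int) (out : List Int) : Decidable (Spec_top_three l teammates out) := by unfold Spec_top_three; infer_instance

-- ===== CLAIM (what is proved, stated in full; the proofs are below) =====
def Claim_equal_top_three : Prop := ∀ (l : List Int) (teammates : List Int), Dom_top_three l teammates → Pre_top_three l teammates → Spec_top_three l teammates (top_three l teammates)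

-- ===== LEMMAS AND PROOFS =====

-- A's dict after the loop: value v ↦ its first index in l, repeated (count of v) times.
lemma A_dict_getD (l xs : List Int) (d : PySem.Dict Int (List Int)) (v : Int) :
    (xs.foldl (aStep l) d).getD v []
    = d.getD v [] ++ List.replicate (xs.count v) ((PySem.List.index? l v).getD 0 : Int) := by
  induction xs generalizing d with
  | nil => simp
  | cons x xs ih =>
    simp only [List.foldl_cons, ih]
    rcases eq_or_ne x v with rfl | hx
    · by_cases hc : d.contains x = true
      · rw [aStep, if_pos hc]
        simp [PySem.Dict.getD_insert, List.count_cons, List.replicate_succ]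
      · rw [aStep, if_neg (by simp [hc]),
          PySem.Dict.getD_of_not_contains d [] (by simpa using hc)]
        simp [PySem.Dict.getD_insert, List.count_cons, List.replicate_succ]
    · have hne : v ≠ x := hx.symm
      have hstep : (aStep l d x).getD v [] = d.getD v [] := by
        rw [aStep]; split_ifs <;> rw [PySem.Dict.getD_insert_of_ne _ _ _ hne]
      rw [hstep]
      simp [List.count_cons, hne, hx]

-- B's scan: first component is the first index of v, second its count.
lemma fc_loop (v : Int) (xs : List Int) (s f0 c0 : Int) (hc : 0 ≤ c0) :
    (PySem.List.enumerate xs s).foldl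
      (fun st p => if p.2 = v then ((if st.2 = 0 then p.1 else st.1), st.2 + 1) else st)
      (f0, c0)
    = ((if c0 = 0 ∧ v ∈ xs then s + ((PySem.List.index? xs v).getD 0 : Int) else f0),
       c0 + (xs.count v : Int)) := by
  induction xs generalizing s f0 c0 with
  | nil => simp [PySem.List.enumerate_nil]
  | cons x xs ih =>
    rw [PySem.List.enumerate_cons]
    simp only [List.foldl_cons]
    rcases eq_or_ne x v with rfl | hx
    · have h1 : (if (s, x).2 = x then ((if c0 = 0 then (s, x).1 else f0), c0 + 1) else (f0, c0))
          = ((if c0 = 0 then s else f0), c0 + 1) := by simp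
      rw [h1, ih (s + 1) _ _ (by omega)]
      have hne : ¬ ((c0 + 1 = 0) ∧ x ∈ xs) := by rintro ⟨h, -⟩; omega
      have hidx : (PySem.List.index? (x :: xs) x).getD 0 = 0 := by
        rw [PySem.List.index?_cons_self]; rfl
      have hmem : x ∈ x :: xs := List.mem_cons_self
      rw [if_neg hne]
      refine Prod.ext ?_ ?_
      · simp only [hmem, and_true, hidx, Int.natCast_zero, add_zero]
      · simp only [List.count_cons_self]
        push_cast
        ring
    · have h1 : (if (s, x).2 = v then ((if c0 = 0 then (s, x).1 else f0), c0 + 1) else (f0, c0))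
          = (f0, c0) := by simp [hx]
      rw [h1, ih (s + 1) f0 c0 hc]
      by_cases hm : v ∈ xs
      · obtain ⟨k, hk⟩ := Option.isSome_iff_exists.1
          ((PySem.List.index?_isSome_iff (v := v) (xs := xs)).2 hm)
        have hcons : (PySem.List.index? (x :: xs) v).getD 0 = k + 1 := by
          rw [PySem.List.index?_cons_of_ne xs hx, hk]; rfl
        have hk' : (PySem.List.index? xs v).getD 0 = k := by rw [hk]; rfl
        have hmem : v ∈ x :: xs := List.mem_cons_of_mem _ hm
        refine Prod.ext ?_ ?_
        · simp only [hm, and_true, hmem, hcons, hk']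
          split_ifs with h0
          · push_cast; ring
          · rfl
        · simp only [List.count_cons, beq_iff_eq, hx, if_false]
          push_cast
          ring
      · have hmem : v ∉ x :: xs := by simp [hm, hx.symm]
        refine Prod.ext ?_ ?_
        · simp [hm, hmem]
        · simp only [List.count_cons, beq_iff_eq, hx, if_false]
          push_cast
          ring

lemma firstCount_spec (l : List Int) (v : Int) (hv : v ∈ l) :
    firstCount l v = (((PySem.List.index? l v).getD 0 : Int), (l.count v : Int)) := by
  unfold firstCount
  rw [fc_loop v l 0 (-1) 0 le_rfl]
  simp [hv]

-- length of an insertion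
lemma length_insDesc (s : List Int) (a : Int) : (insDesc s a).length = s.length + 1 := by
  induction s with
  | nil => rfl
  | cons x xs ih => simp only [insDesc]; split_ifs <;> simp [ih]

lemma insDesc_perm (s : List Int) (a : Int) : (insDesc s a).Perm (a :: s) := by
  induction s with
  | nil => rfl
  | cons x xs ih =>
    simp only [insDesc]; split_ifs with h
    · rfl
    · exact (ih.cons x).trans (List.Perm.swap a x xs)

lemma insDesc_sorted (s : List Int) (a : Int) (h : s.Pairwise (· ≥ ·)) :
    (insDesc s a).Pairwise (· ≥ ·) := by
  induction s with
  | nil => simp [insDesc]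
  | cons x xs ih =>
    rcases List.pairwise_cons.1 h with ⟨hx, hxs⟩
    simp only [insDesc]; split_ifs with hlt
    · refine List.pairwise_cons.2 ⟨?_, h⟩
      intro y hy
      rcases List.mem_cons.1 hy with rfl | hy
      · exact le_of_lt hlt
      · exact le_trans (hx y hy) (le_of_lt hlt)
    · refine List.pairwise_cons.2 ⟨?_, ih hxs⟩
      intro y hy
      rcases List.mem_cons.1 ((insDesc_perm xs a).mem_iff.1 hy) with rfl | h1
      · exact not_lt.1 hlt
      · exact hx y h1

-- the foldl of insDesc is a permutation of its input, and sorted descending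
lemma foldl_insDesc_perm (xs s : List Int) : (xs.foldl insDesc s).Perm (s ++ xs) := by
  induction xs generalizing s with
  | nil => simp
  | cons x xs ih =>
    simp only [List.foldl_cons]
    refine (ih (insDesc s x)).trans ?_
    have h1 : (insDesc s x ++ xs).Perm ((x :: s) ++ xs) :=
      (insDesc_perm s x).append_right xs
    exact h1.trans List.perm_middle.symm

lemma foldl_insDesc_sorted (xs s : List Int) (h : s.Pairwise (· ≥ ·)) :
    (xs.foldl insDesc s).Pairwise (· ≥ ·) := by
  induction xs generalizing s with
  | nil => exact h
  | cons x xs ih => exact ih _ (insDesc_sorted s x h)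

-- PySem's reverse sort coincides with the insertion sort B uses
lemma sorted_eq_foldl_insDesc (l : List Int) :
    PySem.List.sorted l (fun x => x) true = l.foldl insDesc [] := by
  haveI : Std.Antisymm (fun (a b : Int) => a ≥ b) := ⟨fun a b h1 h2 => le_antisymm h2 h1⟩
  refine List.Perm.eq_of_pairwise' (r := fun (a b : Int) => a ≥ b) ?_ ?_ ?_
  · exact PySem.List.sorted_pairwise_rev l _
  · exact foldl_insDesc_sorted l [] (by simp)
  · exact (PySem.List.sorted_perm l _ true).trans
      (by simpa using (foldl_insDesc_perm l []).symm)

-- take n commutes with insertion past the first n slots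
lemma take_insDesc (n : Nat) (s : List Int) (a : Int) :
    (insDesc s a).take n = (insDesc (s.take n) a).take n := by
  induction s generalizing n with
  | nil => simp
  | cons x xs ih =>
    cases n with
    | zero => simp
    | succ m =>
      simp only [insDesc, List.take_succ_cons]
      split_ifs with h
      · cases m with
        | zero => simp [insDesc, h]
        | succ k => simp [insDesc, h, List.take_take]
      · simp only [insDesc, h, if_false, List.take_succ_cons]
        rw [ih m]

-- topStep on the truncated buffer = truncation of a full insertion
lemma topStep_take (s : List Int) (a : Int) (h : s.Pairwise (· ≥ ·)) :
    topStep (s.take 3) a = (insDesc s a).take 3 := by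
  by_cases hlen : s.length < 3
  · have hts : s.take 3 = s := List.take_of_length_le (by omega)
    have hcond : (s.take 3).length < 3 ∨ PySem.List.pyGetD (s.take 3) (-1) 0 < a :=
      Or.inl (by rw [hts]; exact hlen)
    rw [topStep, if_pos hcond, hts]
    show (if (insDesc s a).length > 3 then (insDesc s a).dropLast else insDesc s a)
        = (insDesc s a).take 3
    have hl : ¬ (insDesc s a).length > 3 := by rw [length_insDesc]; omega
    rw [if_neg hl]
    exact (List.take_of_length_le (by rw [length_insDesc]; omega)).symm
  · rcases s with _ | ⟨s0, _ | ⟨s1, _ | ⟨s2, rest⟩⟩⟩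
    · exact absurd (by simp) hlen
    · exact absurd (by simp) hlen
    · exact absurd (by simp) hlen
    · have hts : (s0 :: s1 :: s2 :: rest).take 3 = [s0, s1, s2] := by simp
      have hlast : PySem.List.pyGetD [s0, s1, s2] (-1) 0 = s2 := by
        rw [PySem.List.pyGetD_neg_one [s0, s1, s2] 0 (by simp)]
        rfl
      have h01 : s0 ≥ s1 := (List.pairwise_cons.1 h).1 s1 (by simp)
      have h02 : s0 ≥ s2 := (List.pairwise_cons.1 h).1 s2 (by simp)
      have h12 : s1 ≥ s2 := (List.pairwise_cons.1 (List.pairwise_cons.1 h).2).1 s2 (by simp)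
      rw [take_insDesc 3 _ a, hts]
      by_cases hgt : s2 < a
      · have hcond : ([s0, s1, s2] : List Int).length < 3 ∨
            PySem.List.pyGetD [s0, s1, s2] (-1) 0 < a := by
          rw [hlast]; exact Or.inr hgt
        rw [topStep, if_pos hcond]
        show (if (insDesc [s0, s1, s2] a).length > 3 then (insDesc [s0, s1, s2] a).dropLast
            else insDesc [s0, s1, s2] a) = (insDesc [s0, s1, s2] a).take 3
        have hl4 : (insDesc [s0, s1, s2] a).length > 3 := by rw [length_insDesc]; simp
        rw [if_pos hl4, List.dropLast_eq_take, length_insDesc]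
        simp
      · have hcond : ¬ (([s0, s1, s2] : List Int).length < 3 ∨
            PySem.List.pyGetD [s0, s1, s2] (-1) 0 < a) := by
          rw [hlast]
          rintro (h3 | h3)
          · simp at h3
          · exact hgt h3
        rw [topStep, if_neg hcond]
        have hins : insDesc [s0, s1, s2] a = [s0, s1, s2, a] := by
          have n0 : ¬ s0 < a := by omega
          have n1 : ¬ s1 < a := by omega
          have n2 : ¬ s2 < a := by omega
          simp [insDesc, n0, n1, n2]
        rw [hins]
        simp

lemma foldl_topStep_eq (xs : List Int) (s : List Int) (h : s.Pairwise (· ≥ ·)) :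
    xs.foldl topStep (s.take 3) = (xs.foldl insDesc s).take 3 := by
  induction xs generalizing s with
  | nil => rfl
  | cons x xs ih =>
    simp only [List.foldl_cons]
    rw [topStep_take s x h, ih (insDesc s x) (insDesc_sorted s x h)]

-- main equality
lemma top_three_eq_alt (l teammates : List Int) :
    top_three l teammates = top_three_alt l teammates := by
  unfold top_three top_three_alt
  have htop : l.foldl topStep [] = (PySem.List.sorted l (fun x => x) true).take 3 := by
    have := foldl_topStep_eq l [] (by simp)
    simpa [sorted_eq_foldl_insDesc] using this
  have hslice : PySem.List.slice (PySem.List.sorted l (fun x => x) true) (some 0) (some 3)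
      = (PySem.List.sorted l (fun x => x) true).take 3 := by
    rw [PySem.List.slice_zero_start, PySem.List.slice_to _ (by norm_num)]
    rfl
  simp only [htop, hslice, List.foldl_map]
  apply PySem.List.foldl_congr_mem
  intro acc v hv
  have hvl : v ∈ l := by
    have := List.mem_of_mem_take hv
    exact (PySem.List.mem_sorted _ _ _ _).1 this
  have hcE0 : (PySem.Dict.empty : PySem.Dict Int (List Int)).contains v = false := rfl
  have hA : (l.foldl (aStep l) PySem.Dict.empty).getD v []
      = List.replicate (l.count v) ((PySem.List.index? l v).getD 0 : Int) := by
    rw [A_dict_getD]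
    simp [PySem.Dict.getD_of_not_contains PySem.Dict.empty ([] : List Int) hcE0]
  rw [hA, firstCount_spec l v hvl]
  rw [PySem.List.foldl_append_singleton_eq_map]
  simp [List.map_replicate]

-- ===== VERDICT (by name: the statement is the Claim_ definition above) =====
theorem top_three_spec : Claim_equal_top_three := by
  intro l teammates _ _
  unfold Spec_top_three
  exact top_three_eq_alt l teammates
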